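-- pv_equiv track=rewrite | github.com/jdjodrey/advent-of-code | 2023/day13/day13_part2.py | has_reflection
-- ===== SOURCE A (Python) =====
-- def has_reflection(idx, pattern, offset=0):
--     prev_idx = idx - offset
--     next_idx = idx + offset + 1
--
--     if prev_idx < 0 or next_idx == len(pattern):
--         return True
--
--     if pattern[prev_idx] == pattern[next_idx]:
--         return has_reflection(idx, pattern, offset=offset + 1)
--
--     return False
-- ===== SOURCE B (Python) =====
-- def has_reflection(idx, pattern, offset=0):
--     if idx < offset:
--         return True
--     upper = pattern[:idx - offset + 1][::-1]
--     lower = pattern[idx + offset + 1:]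
--     return all(a == b for a, b in zip(upper, lower))
-- ===== Notes on version B (the rewrite author's own statement) =====
-- stated objective: simpler
-- what changed: Replaced the tail recursion that walks outward one pair per call with a single slice-and-zip: take the rows above the axis reversed, the rows below, and check pairwise equality with all(); zip's truncation realises both stopping conditions.
-- outside the precondition, e.g. on has_reflection(0, ['b', 'a', 'b', 'a', 'b'], -4): A returns False, B returns True; on has_reflection(10, ['a'], 0): A raises IndexError, B returns True
import Mathlib
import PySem

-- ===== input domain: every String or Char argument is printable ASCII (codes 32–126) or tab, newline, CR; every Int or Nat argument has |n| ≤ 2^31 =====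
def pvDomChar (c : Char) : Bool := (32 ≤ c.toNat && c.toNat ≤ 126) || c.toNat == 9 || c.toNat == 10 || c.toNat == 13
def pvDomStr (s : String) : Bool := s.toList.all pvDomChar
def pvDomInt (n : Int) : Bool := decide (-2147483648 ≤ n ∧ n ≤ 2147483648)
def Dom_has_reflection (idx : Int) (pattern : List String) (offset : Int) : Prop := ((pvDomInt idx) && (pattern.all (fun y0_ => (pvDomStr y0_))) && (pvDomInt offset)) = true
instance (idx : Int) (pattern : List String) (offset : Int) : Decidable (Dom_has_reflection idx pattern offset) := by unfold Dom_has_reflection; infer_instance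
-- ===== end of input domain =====

-- B replaces A's outward-walking tail recursion by slicing the rows above the axis
-- (reversed) and below it and comparing them pairwise with zip/all (objective: simpler).

-- ===== PORT A =====
def has_reflection (idx : Int) (pattern : List String) (offset : Int) : Bool :=
  let prev_idx := idx - offset
  let next_idx := idx + offset + 1
  if prev_idx < 0 || next_idx == (pattern.length : Int) then true
  else
    match PySem.List.pyGet? pattern prev_idx, PySem.List.pyGet? pattern next_idx with
    | some a, some b => if a == b then has_reflection idx pattern (offset + 1) else false
    | _, _ => false   -- IndexError in Python; such inputs are outside Pre_
termination_by (idx - offset + 1).toNat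
decreasing_by
  rename_i h
  simp only [Bool.or_eq_true, decide_eq_true_eq, beq_iff_eq, not_or] at h
  omega

-- ===== PORT B =====
def has_reflection_alt (idx : Int) (pattern : List String) (offset : Int) : Bool :=
  if idx < offset then true
  else
    let upper := (PySem.List.slice pattern none (some (idx - offset + 1))).reverse
    let lower := PySem.List.slice pattern (some (idx + offset + 1)) none
    (upper.zip lower).all (fun p => p.1 == p.2)

-- ===== PRECONDITION & SPEC =====
-- Pre_ excludes (a) inputs where A raises IndexError (an out-of-range row index is
-- reached), and (b) negative starting offsets/indices, where any value A returns comes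
-- from Python's accidental negative-index wraparound — a defensible corner no caller of
-- this AoC helper exercises (it is always called with offset=0 and 0 ≤ idx < len-1).
def Pre_has_reflection (idx : Int) (pattern : List String) (offset : Int) : Prop :=
  idx < offset ∨ (0 ≤ offset ∧ 0 ≤ idx ∧ idx + offset + 1 ≤ (pattern.length : Int))
instance (idx : Int) (pattern : List String) (offset : Int) : Decidable (Pre_has_reflection idx pattern offset) := by unfold Pre_has_reflection; infer_instance

def pvWitness_has_reflection : Int × List String × Int := (1, ["a", "b", "b", "a"], 0)

def Spec_has_reflection (idx : Int) (pattern : List String) (offset : Int) (out : Bool) : Prop := out = has_reflection_alt idx pattern offset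
instance (idx : Int) (pattern : List String) (offset : Int) (out : Bool) : Decidable (Spec_has_reflection idx pattern offset out) := by unfold Spec_has_reflection; infer_instance

-- ===== CLAIM (what is proved, stated in full; the proofs are below) =====
def Claim_equal_has_reflection : Prop := ∀ (idx : Int) (pattern : List String) (offset : Int), Dom_has_reflection idx pattern offset → Pre_has_reflection idx pattern offset → Spec_has_reflection idx pattern offset (has_reflection idx pattern offset)

-- ===== LEMMAS AND PROOFS =====

-- In the good region, B's zip/all unfolds one outward comparison at a time.
theorem alt_true_of_lt (idx : Int) (pattern : List String) (offset : Int)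
    (h : idx < offset) : has_reflection_alt idx pattern offset = true := by
  simp [has_reflection_alt, h]

theorem main_lemma (n : Nat) : ∀ (idx offset : Int) (pattern : List String),
    (idx - offset + 1).toNat ≤ n → 0 ≤ offset → 0 ≤ idx →
    idx + offset + 1 ≤ (pattern.length : Int) →
    has_reflection idx pattern offset = has_reflection_alt idx pattern offset := by
  induction n with
  | zero =>
    intro idx offset pattern hfuel _ _ _
    have hlt : idx < offset := by omega
    rw [alt_true_of_lt idx pattern offset hlt]
    rw [has_reflection.eq_def]
    have : idx - offset < 0 := by omega
    simp [this]
  | succ n ih =>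
    intro idx offset pattern hfuel hoff hidx hbound
    by_cases hlt : idx < offset
    · rw [alt_true_of_lt idx pattern offset hlt]
      rw [has_reflection.eq_def]
      have : idx - offset < 0 := by omega
      simp [this]
    · push Not at hlt
      -- 0 ≤ idx - offset, idx+offset+1 ≤ len
      set k : Nat := (idx - offset).toNat with hk
      set m : Nat := (idx + offset + 1).toNat with hm
      have hkc : (idx - offset) = (k : Int) := by omega
      have hmc : (idx + offset + 1) = (m : Int) := by omega
      have hkl : k < pattern.length := by omega
      have hml : m ≤ pattern.length := by omega
      -- B's slices
      have hupper : PySem.List.slice pattern none (some (idx - offset + 1))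
          = pattern.take (k + 1) := by
        rw [hkc]
        have : ((k : Int) + 1) = ((k + 1 : Nat) : Int) := by push_cast; ring
        rw [this, PySem.List.slice_to_natCast]
      have hlower : PySem.List.slice pattern (some (idx + offset + 1)) none
          = pattern.drop m := by
        rw [hmc, PySem.List.slice_from_natCast]
      by_cases hend : idx + offset + 1 = (pattern.length : Int)
      · -- next == len: both true
        rw [has_reflection.eq_def]
        have hmlen : m = pattern.length := by omega
        simp only [hend, beq_self_eq_true, Bool.or_true, if_true]
        rw [has_reflection_alt]
        simp [hlt.not_gt, hlower, hmlen]
      · -- next < len: one comparison then recurse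
        have hmlt : m < pattern.length := by omega
        have hprevget : PySem.List.pyGet? pattern (idx - offset) = some pattern[k] := by
          rw [hkc]; simp [hkl]
        have hnextget : PySem.List.pyGet? pattern (idx + offset + 1) = some pattern[m] := by
          rw [hmc]; simp [hmlt]
        have hcondA : ¬ (idx - offset < 0 || (idx + offset + 1 == (pattern.length : Int))) := by
          simp only [Bool.or_eq_true, decide_eq_true_eq, beq_iff_eq, not_or]
          exact ⟨by omega, hend⟩
        rw [has_reflection.eq_def]
        simp only [hcondA, hprevget, hnextget]
        -- B at offset
        have htake : pattern.take (k + 1) = pattern.take k ++ [pattern[k]] := by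
          rw [List.take_add_one]
          simp [List.getElem?_eq_getElem hkl]
        have hdrop : pattern.drop m = pattern[m] :: pattern.drop (m + 1) :=
          List.drop_eq_getElem_cons hmlt
        have hB : has_reflection_alt idx pattern offset
            = ((pattern[k] == pattern[m]) &&
               (((pattern.take k).reverse.zip (pattern.drop (m + 1))).all
                 (fun p => p.1 == p.2))) := by
          rw [has_reflection_alt]
          simp only [hlt.not_gt, if_false]
          rw [hupper, hlower, htake, hdrop, List.reverse_append,
              List.reverse_singleton, List.singleton_append, List.zip_cons_cons,
              List.all_cons]
        rw [hB]
        -- the recursive call on both sides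
        have hrec : has_reflection idx pattern (offset + 1)
            = has_reflection_alt idx pattern (offset + 1) := by
          apply ih idx (offset + 1) pattern
          · omega
          · omega
          · exact hidx
          · omega
        by_cases heq : pattern[k] = pattern[m]
        · simp only [heq, beq_self_eq_true, if_true, Bool.true_and]
          rw [hrec]
          by_cases hlt2 : idx < offset + 1
          · -- offset = idx: both sides true
            have hk0 : k = 0 := by omega
            rw [alt_true_of_lt idx pattern (offset + 1) hlt2]
            simp [hk0]
          · push Not at hlt2
            rw [has_reflection_alt]
            simp only [hlt2.not_gt, if_false]
            have hupper' : PySem.List.slice pattern none (some (idx - (offset + 1) + 1))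
                = pattern.take k := by
              have : (idx - (offset + 1) + 1) = (k : Int) := by omega
              rw [this, PySem.List.slice_to_natCast]
            have hlower' : PySem.List.slice pattern (some (idx + (offset + 1) + 1)) none
                = pattern.drop (m + 1) := by
              have : (idx + (offset + 1) + 1) = ((m + 1 : Nat) : Int) := by omega
              rw [this, PySem.List.slice_from_natCast]
            rw [hupper', hlower']
            simp
        · have : (pattern[k] == pattern[m]) = false := by simp [heq]
          simp [this]

-- ===== VERDICT (by name: the statement is the Claim_ definition above) =====
theorem has_reflection_spec : Claim_equal_has_reflection := by
  intro idx pattern offset _ hpre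
  unfold Spec_has_reflection
  rcases hpre with hlt | ⟨hoff, hidx, hbound⟩
  · rw [alt_true_of_lt idx pattern offset hlt]
    rw [has_reflection.eq_def]
    have : idx - offset < 0 := by omega
    simp [this]
  · exact main_lemma (idx - offset + 1).toNat idx offset pattern le_rfl hoff hidx hbound
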